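-- pv_equiv track=rewrite | github.com/setiastro/setiastrosuitepro | src/setiastro/saspro/cosmicclarity_engines/sharpen_engine.py | _iter_batch_sizes
-- ===== SOURCE A (Python) =====
-- def _iter_batch_sizes(initial: int):
--     bs = max(1, int(initial))
--     yielded = set()
--     while bs >= 1:
--         if bs not in yielded:
--             yielded.add(bs)
--             yield bs
--         if bs == 1:
--             break
--         bs = max(1, bs // 2)
-- ===== SOURCE B (Python) =====
-- def _iter_batch_sizes(initial: int):
--     n = max(1, int(initial))
--     prefixes = []
--     acc = 0
--     for ch in bin(n)[2:]:
--         acc = 2 * acc + (1 if ch == '1' else 0)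
--         prefixes.append(acc)
--     yield from reversed(prefixes)
-- ===== Notes on version B (the rewrite author's own statement) =====
-- stated objective: alternative
-- what changed: B never halves: it scans the binary digits of n = max(1, int(initial)) front to back, accumulating the value of each binary prefix into a list, and yields that list reversed; A instead runs a stateful while-loop that repeatedly floor-halves with a redundant 'yielded' set and break.
import Mathlib
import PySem

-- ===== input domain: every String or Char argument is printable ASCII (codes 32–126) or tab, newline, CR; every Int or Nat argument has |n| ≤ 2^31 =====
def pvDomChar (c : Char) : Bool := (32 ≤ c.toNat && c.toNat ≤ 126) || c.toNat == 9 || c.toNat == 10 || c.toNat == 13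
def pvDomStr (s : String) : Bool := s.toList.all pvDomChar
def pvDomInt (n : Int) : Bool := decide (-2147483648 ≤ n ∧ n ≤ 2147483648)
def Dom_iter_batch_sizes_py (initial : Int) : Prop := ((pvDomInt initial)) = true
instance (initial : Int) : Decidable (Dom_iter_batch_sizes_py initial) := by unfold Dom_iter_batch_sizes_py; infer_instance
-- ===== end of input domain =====

-- B builds the same sequence by accumulating the binary-prefix values of bin(n) and
-- reversing, instead of A's stateful halving while-loop; objective: alternative.

-- ===== PORT A =====
-- the while-loop of A: state is (bs, yielded); acc collects the yielded values
def iterBatchLoopA (bs : Int) (yielded : PySem.Set Int) (acc : List Int) : List Int :=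
  if h : 1 ≤ bs then
    let p := if PySem.Set.contains yielded bs then (yielded, acc)
             else (PySem.Set.add yielded bs, acc ++ [bs])
    if bs = 1 then p.2
    else iterBatchLoopA (max 1 (PySem.Int.floordiv bs 2)) p.1 p.2
  else acc
termination_by bs.toNat
decreasing_by
  rw [PySem.Int.floordiv_eq_ediv_of_pos (by omega)]
  omega

def iter_batch_sizes_py (initial : Int) : List Int :=
  iterBatchLoopA (max 1 initial) PySem.Set.empty []

-- ===== PORT B =====
-- bin(n)[2:] is the binary digits of n, most significant first; Nat.bits is LSB-first,
-- so the library call is ported as the reversed bit list rendered as '0'/'1' characters.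
def iter_batch_sizes_py_alt (initial : Int) : List Int :=
  let n := max 1 initial
  let digits : List Char := (n.toNat.bits.reverse).map (fun b => if b then '1' else '0')
  let st := digits.foldl
    (fun (s : Int × List Int) ch =>
      let a := 2 * s.1 + (if ch = '1' then 1 else 0)
      (a, s.2 ++ [a]))
    ((0 : Int), ([] : List Int))
  st.2.reverse

-- ===== PRECONDITION & SPEC =====
def Spec_iter_batch_sizes_py (initial : Int) (out : List Int) : Prop := out = iter_batch_sizes_py_alt initial
instance (initial : Int) (out : List Int) : Decidable (Spec_iter_batch_sizes_py initial out) := by unfold Spec_iter_batch_sizes_py; infer_instance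

-- ===== CLAIM (what is proved, stated in full; the proofs are below) =====
def Claim_equal_iter_batch_sizes_py : Prop := ∀ (initial : Int), Dom_iter_batch_sizes_py initial → Spec_iter_batch_sizes_py initial (iter_batch_sizes_py initial)

-- ===== LEMMAS AND PROOFS =====

-- reference sequence: n, n//2, …, 1 (proof-only)
def halveSeq (n : Int) : List Int :=
  if h : n ≤ 1 then [n]
  else n :: halveSeq (PySem.Int.floordiv n 2)
termination_by n.toNat
decreasing_by
  rw [PySem.Int.floordiv_eq_ediv_of_pos (by omega)]
  omega

lemma loopA_eq_aux (k : Nat) : ∀ (bs : Int) (yielded : PySem.Set Int) (acc : List Int),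
    bs.toNat ≤ k → 1 ≤ bs → (∀ y ∈ yielded, bs < y) →
    iterBatchLoopA bs yielded acc = acc ++ halveSeq bs := by
  induction k with
  | zero => intro bs _ _ hk h1 _; omega
  | succ k ih =>
  intro bs yielded acc hk h1 hy
  rw [iterBatchLoopA]
  have hcm : bs ∉ yielded := fun hmm => absurd (hy bs hmm) (by omega)
  by_cases hb1 : bs = 1
  · subst hb1
    simp [PySem.Set.contains, hcm, halveSeq]
  · have hbs2 : 2 ≤ bs := by omega
    have hdiv : PySem.Int.floordiv bs 2 = bs / 2 :=
      PySem.Int.floordiv_eq_ediv_of_pos (by omega)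
    have hmax : max 1 (PySem.Int.floordiv bs 2) = bs / 2 := by
      rw [hdiv]; omega
    have hlc : yielded.contains bs = false := by simpa using hcm
    simp only [h1, dif_pos, hlc, Bool.false_eq_true, if_false, hb1, if_neg, not_false_iff]
    rw [show PySem.Set.add yielded bs = yielded ++ [bs] by simp [PySem.Set.add, hlc, hcm]]
    rw [ih (max 1 (PySem.Int.floordiv bs 2))
        (yielded ++ [bs]) (acc ++ [bs]) (by rw [hmax]; omega) (by rw [hmax]; omega)
        (by
          intro y hym
          rw [hmax]
          rcases List.mem_append.mp hym with hmem | hmem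
          · have := hy y hmem; omega
          · simp at hmem; omega)]
    rw [hmax]
    conv_rhs => rw [halveSeq]
    rw [dif_neg (show ¬ bs ≤ 1 by omega), hdiv]
    simp

lemma loopA_eq (bs : Int) (yielded : PySem.Set Int) (acc : List Int)
    (h1 : 1 ≤ bs) (hy : ∀ y ∈ yielded, bs < y) :
    iterBatchLoopA bs yielded acc = acc ++ halveSeq bs :=
  loopA_eq_aux bs.toNat bs yielded acc le_rfl h1 hy

-- the fold step of B, named for the lemmas
def stepB (s : Int × List Int) (ch : Char) : Int × List Int :=
  let a := 2 * s.1 + (if ch = '1' then 1 else 0)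
  (a, s.2 ++ [a])

-- bits of a positive m decompose as bodd :: bits (m / 2)
lemma bits_decomp (m : Nat) (h1 : 1 ≤ m) : m.bits = m.bodd :: (m / 2).bits := by
  have hb : Nat.bit m.bodd (m / 2) = m := by
    have h := Nat.bodd_add_div2 m
    rw [Nat.div2_val] at h
    cases hbo : m.bodd <;> rw [hbo] at h <;> simp at h <;> simp [Nat.bit] <;> omega
  have : (Nat.bit m.bodd (m / 2)).bits = m.bodd :: (m / 2).bits := by
    apply Nat.bits_append_bit
    intro h0
    by_contra hbo
    simp only [Bool.not_eq_true] at hbo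
    rw [h0, hbo] at hb
    simp [Nat.bit] at hb
    omega
  rw [hb] at this
  exact this

-- folding B's step over the MSB-first digits of m computes (m, (halveSeq m).reverse)
lemma foldB_eq (k : Nat) : ∀ (m : Nat), m ≤ k → 1 ≤ m →
    ((m.bits.reverse).map (fun b => if b then '1' else '0')).foldl stepB ((0 : Int), ([] : List Int))
      = ((m : Int), (halveSeq (m : Int)).reverse) := by
  induction k with
  | zero => intro m hk h1; omega
  | succ k ih =>
  intro m hk h1
  rw [bits_decomp m h1, List.reverse_cons, List.map_append, List.foldl_append]
  by_cases hm1 : m = 1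
  · subst hm1
    have h0 : (1 / 2 : Nat).bits = [] := by norm_num
    have hh : halveSeq ((1 : Nat) : Int) = [1] := by rw [halveSeq]; simp
    rw [h0, hh, show Nat.bodd 1 = true from rfl]
    simp [stepB]
  · have h2 : 2 ≤ m := by omega
    rw [ih (m / 2) (by omega) (by omega)]
    have hch : (if m.bodd then '1' else '0') = '1' ↔ m.bodd = true := by
      cases m.bodd <;> simp
    have hres : 2 * ((m / 2 : Nat) : Int) + (if (if m.bodd then '1' else '0') = '1' then (1:Int) else 0) = (m : Int) := by
      have hb := Nat.bodd_add_div2 m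
      rw [Nat.div2_val] at hb
      cases hbo : m.bodd
      · rw [hbo] at hb; simp at hb ⊢; push_cast; omega
      · rw [hbo] at hb; simp at hb ⊢; push_cast; omega
    simp only [List.map_cons, List.map_nil, List.foldl_cons, List.foldl_nil, stepB]
    rw [hres]
    have hhs : halveSeq (m : Int) = (m : Int) :: halveSeq ((m / 2 : Nat) : Int) := by
      rw [halveSeq]
      rw [dif_neg (show ¬ (m : Int) ≤ 1 by exact_mod_cast (by omega : ¬ (m:Int) ≤ 1))]
      rw [show PySem.Int.floordiv ((m : Nat) : Int) 2 = ((m / 2 : Nat) : Int) from by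
        exact_mod_cast PySem.Int.floordiv_natCast m 2]
    rw [hhs]
    simp

-- ===== VERDICT (by name: the statement is the Claim_ definition above) =====
theorem iter_batch_sizes_py_spec : Claim_equal_iter_batch_sizes_py := by
  intro initial _
  show _ = _
  unfold iter_batch_sizes_py iter_batch_sizes_py_alt
  rw [loopA_eq _ _ _ (by omega) (by intro y hy; simp [PySem.Set.empty] at hy)]
  show halveSeq (max 1 initial)
      = (((max 1 initial).toNat.bits.reverse.map (fun b => if b then '1' else '0')).foldl stepB ((0:Int), ([] : List Int))).2.reverse
  rw [foldB_eq (max 1 initial).toNat (max 1 initial).toNat le_rfl (by omega)]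
  rw [show ((max 1 initial).toNat : Int) = max 1 initial by omega]
  simp
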